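-- pv_equiv track=rewrite | github.com/gokulgk-9402/Daily-CP-November-2022 | ShreyanshAndHisBits.py | count
-- ===== SOURCE A (Python) =====
-- def count (N):
--     # code here
--
--     def comb(n,r):
--         if r > n:
--             return 0
--         if r == 0 or r == n:
--             return 1
--         if mem[n][r] != -1:
--             return mem[n][r]
--
--         mem[n][r] = comb(n-1, r-1) + comb(n-1, r)
--         return mem[n][r]
--
--     mem = [[-1]*40 for _ in range(40)]
--     ans = 0
--     ones = 0
--     bits = 0
--     while N!= 0:
--         if N&1:
--             ans += comb(bits, ones+1)
--             ones += 1
--         bits += 1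
--         N = N>>1
--     return ans
-- ===== SOURCE B (Python) =====
-- import math
--
-- def count(N):
--     # Recursive descent over the bits of N; math.comb replaces the memoized
--     # Pascal-triangle DP (math.comb(n, k) == 0 when k > n >= 0, matching A's guard).
--     def go(n, bits, ones):
--         if n == 0:
--             return 0
--         if n & 1:
--             return math.comb(bits, ones + 1) + go(n >> 1, bits + 1, ones + 1)
--         return go(n >> 1, bits + 1, ones)
--     return go(N, 0, 0)
-- ===== Notes on version B (the rewrite author's own statement) =====
-- stated objective: simpler
-- what changed: Replaces the while-loop with mutable accumulators plus a 40x40 memo table and recursive Pascal-rule comb by a short recursive descent over the bits that computes each binomial coefficient directly with math.comb.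
import Mathlib
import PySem

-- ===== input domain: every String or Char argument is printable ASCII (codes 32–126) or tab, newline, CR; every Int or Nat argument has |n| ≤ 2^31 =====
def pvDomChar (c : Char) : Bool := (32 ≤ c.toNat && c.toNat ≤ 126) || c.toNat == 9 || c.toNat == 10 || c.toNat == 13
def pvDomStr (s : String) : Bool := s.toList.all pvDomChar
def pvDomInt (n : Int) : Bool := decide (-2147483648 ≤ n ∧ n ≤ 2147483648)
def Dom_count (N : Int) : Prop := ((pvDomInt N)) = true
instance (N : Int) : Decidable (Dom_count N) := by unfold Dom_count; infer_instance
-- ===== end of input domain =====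

-- B replaces A's while-loop + memoized Pascal-triangle comb with a recursive
-- descent over the bits using a direct binomial coefficient (simpler; same cost).


-- ===== PORT A =====
-- A's inner comb: same branches in the same order; the memo table is a pure
-- cache (it only stores values comb itself computes), so it is dropped; the
-- fuel argument only makes the recursion structurally total and is never
-- exhausted on the calls the port makes (n = bits, fuel = bits.toNat + 1).
def combA (f : Nat) (n r : Int) : Int :=
  if r > n then 0
  else if r = 0 ∨ r = n then 1
  else match f with
  | 0 => 0
  | f + 1 => combA f (n - 1) (r - 1) + combA f (n - 1) r

-- A's while loop; fuel makes it total (N.toNat + 1 ≥ the number of iterations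
-- for N ≥ 0; Python diverges for N < 0, excluded by Pre_count).
def loopA (f : Nat) (N ans ones bits : Int) : Int :=
  if N = 0 then ans
  else match f with
  | 0 => ans
  | f + 1 =>
    if PySem.Int.mod N 2 ≠ 0 then  -- N & 1 truthy
      loopA f (PySem.Int.floordiv N 2) (ans + combA (bits.toNat + 1) bits (ones + 1)) (ones + 1) (bits + 1)
    else
      loopA f (PySem.Int.floordiv N 2) ans ones (bits + 1)

def count (N : Int) : Int := loopA (N.toNat + 1) N 0 0 0

-- ===== PORT B =====
-- math.comb(n, k): B only calls it with n ≥ 0, k ≥ 1 (where it never raises).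
def mathComb (n k : Int) : Int := (Nat.choose n.toNat k.toNat : Int)

def goB (f : Nat) (n bits ones : Int) : Int :=
  if n = 0 then 0
  else match f with
  | 0 => 0
  | f + 1 =>
    if PySem.Int.mod n 2 ≠ 0 then
      mathComb bits (ones + 1) + goB f (PySem.Int.floordiv n 2) (bits + 1) (ones + 1)
    else
      goB f (PySem.Int.floordiv n 2) (bits + 1) ones

def count_alt (N : Int) : Int := goB (N.toNat + 1) N 0 0

-- ===== PRECONDITION & SPEC =====
-- Pre_ excludes negative N, on which A's while loop never terminates
-- (right-shifting a negative int never reaches zero); B diverges there too.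
def Pre_count (N : Int) : Prop := 0 ≤ N
instance (N : Int) : Decidable (Pre_count N) := by unfold Pre_count; infer_instance
def pvWitness_count : Int := (11)

def Spec_count (N : Int) (out : Int) : Prop := out = count_alt N
instance (N : Int) (out : Int) : Decidable (Spec_count N out) := by unfold Spec_count; infer_instance

-- ===== CLAIM =====
def Claim_equal_count : Prop := ∀ (N : Int), Dom_count N → Pre_count N → Spec_count N (count N)

-- ===== LEMMAS AND PROOFS =====
-- A's comb computes the binomial coefficient (given enough fuel).
theorem combA_eq (f : Nat) : ∀ (n r : Int), 0 ≤ n → 0 ≤ r → n.toNat ≤ f →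
    combA f n r = (Nat.choose n.toNat r.toNat : Int) := by
  induction f with
  | zero =>
    intro n r hn hr hf
    have hn0 : n = 0 := by omega
    subst hn0
    unfold combA
    rcases eq_or_lt_of_le hr with h | h
    · simp [← h]
    · have hc : (0:Nat).choose r.toNat = 0 := Nat.choose_eq_zero_of_lt (by omega)
      simp [h, hc]
  | succ f ih =>
    intro n r hn hr hf
    unfold combA
    by_cases h1 : r > n
    · simp [h1, Nat.choose_eq_zero_of_lt (by omega : n.toNat < r.toNat)]
    · by_cases h2 : r = 0 ∨ r = n
      · rcases h2 with h2 | h2 <;> subst h2 <;> simp [h1]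
      · push_neg at h2
        have hr1 : 1 ≤ r := by omega
        have hn1 : 1 ≤ n := by omega
        simp only [if_neg h1, if_neg (by tauto : ¬(r = 0 ∨ r = n))]
        rw [ih (n-1) (r-1) (by omega) (by omega) (by omega),
            ih (n-1) r (by omega) (by omega) (by omega)]
        have hne : n.toNat = (n-1).toNat + 1 := by omega
        have hre : r.toNat = (r-1).toNat + 1 := by omega
        rw [hne, hre, Nat.choose_succ_succ]
        push_cast [Nat.succ_eq_add_one]
        ring

theorem loopA_eq_goB (f : Nat) : ∀ (N ans ones bits : Int), 0 ≤ ones → 0 ≤ bits →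
    loopA f N ans ones bits = goB f N bits ones + ans := by
  induction f with
  | zero =>
    intro N ans ones bits _ _
    unfold loopA goB
    by_cases h : N = 0 <;> simp [h]
  | succ f ih =>
    intro N ans ones bits hones hbits
    unfold loopA goB
    by_cases h : N = 0
    · simp [h]
    · simp only [if_neg h]
      by_cases hb : PySem.Int.mod N 2 ≠ 0
      · simp only [if_pos hb]
        rw [ih _ _ _ (bits+1) (by omega) (by omega),
            combA_eq _ bits (ones+1) hbits (by omega) (by omega)]
        unfold mathComb
        ring
      · simp only [if_neg hb]
        exact ih _ _ _ (bits+1) hones (by omega)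

-- ===== VERDICT =====
theorem count_spec : Claim_equal_count := by
  intro N _ _
  unfold Spec_count count count_alt
  rw [loopA_eq_goB (N.toNat + 1) N 0 0 0 le_rfl le_rfl]
  ring
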